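-- pv_equiv track=rewrite | github.com/bagpipeFD/lc-plugin-template | python-template/leetcode/editor/cn/longest-substring-with-at-least-k-repeating-characters.py | longestKLetterSubstr
-- ===== SOURCE A (Python) =====
-- def longestKLetterSubstr(s:str,k:int,count:int)->int:
--     res = 0
--     left,right = 0,0
--     windowCount = [0]*26
--     windowUniqueCount = 0
--     windowValidCount = 0
--     while right<len(s):
--         c = s[right]
--         if windowCount[ord(c)-ord('a')]==0:
--             windowUniqueCount+=1
--         windowCount[ord(c)-ord('a')] +=1
--         if windowCount[ord(c)-ord('a')] ==k:
--             windowValidCount +=1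
--         right+=1
--         while windowUniqueCount >count:
--             d = s[left]
--             if windowCount[ord(d)-ord('a')]==k:
--                 windowValidCount-=1
--             windowCount[ord(d)-ord('a')]-=1
--             if windowCount[ord(d)-ord('a')]==0:
--                 windowUniqueCount-=1
--             left+=1
--         if windowValidCount == count:
--             res = max(res,right-left)
--     return res
-- ===== SOURCE B (Python) =====
-- def longestKLetterSubstr(s: str, k: int, count: int) -> int:
--     # Brute force: for each start index, grow the window rightwards, stopping
--     # as soon as it holds more than `count` distinct letters.
--     res = 0
--     n = len(s)
--     for left in range(n):
--         cnt = [0] * 26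
--         uniq = 0
--         valid = 0
--         for right in range(left, n):
--             i = ord(s[right]) - ord('a')
--             if cnt[i] == 0:
--                 uniq += 1
--             cnt[i] += 1
--             if cnt[i] == k:
--                 valid += 1
--             if uniq > count:
--                 break
--             if valid == count:
--                 res = max(res, right - left + 1)
--     return res
-- ===== Notes on version B (the rewrite author's own statement) =====
-- stated objective: simpler
-- what changed: Replaces the amortized two-pointer sliding window (shared 26-slot count array mutated by both ends, inner shrink loop) with a plain brute-force double loop: for each start index a fresh count array grows the window rightwards and breaks once more than `count` distinct letters appear.
import Mathlib
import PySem

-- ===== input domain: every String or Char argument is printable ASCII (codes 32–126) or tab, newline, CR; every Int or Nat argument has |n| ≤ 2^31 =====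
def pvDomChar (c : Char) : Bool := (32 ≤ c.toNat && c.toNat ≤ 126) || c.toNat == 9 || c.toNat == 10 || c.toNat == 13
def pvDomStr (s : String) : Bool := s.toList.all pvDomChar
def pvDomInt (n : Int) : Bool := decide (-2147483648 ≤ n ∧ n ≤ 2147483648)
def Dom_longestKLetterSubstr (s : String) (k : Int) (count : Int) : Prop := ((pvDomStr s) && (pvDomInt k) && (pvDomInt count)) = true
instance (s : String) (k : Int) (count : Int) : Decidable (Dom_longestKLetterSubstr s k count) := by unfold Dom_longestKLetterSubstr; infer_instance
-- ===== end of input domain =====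

-- B replaces A's amortized two-pointer sliding window by a plain brute-force
-- double loop (fresh count array per start index, break past `count` distinct);
-- objective: simpler. Equality of return values is proved on Pre_ below.

-- ===== PORT A =====
-- `none` marks exactly the paths where the Python raises IndexError
-- (bad array index, or the shrink loop running `left` past the end of s);
-- the wrapper returns 0 there, and Pre_ excludes those inputs.

/-- A's inner `while windowUniqueCount > count` shrink loop. `fuel` only bounds
the recursion; it is called with `sl.length + 1`, which the loop can never
exhaust (each pass increments `left`, and `s[left]` raises once `left` is past
the end, i.e. within `sl.length + 1` passes). -/
def aShrink (sl : List Char) (k count : Int) :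
    Nat → List Int → Nat → Int → Int → Option (List Int × Nat × Int × Int)
  | 0, _, _, _, _ => none
  | fuel + 1, wc, left, uniq, valid =>
    if uniq > count then
      match PySem.List.pyGet? sl (left : Int) with
      | none => none
      | some d =>
        match PySem.List.pyGet? wc ((d.toNat : Int) - 97) with
        | none => none
        | some cd =>
          let valid := if cd == k then valid - 1 else valid
          let wc := PySem.List.pySetD wc ((d.toNat : Int) - 97) (cd - 1)
          let uniq := if cd - 1 == 0 then uniq - 1 else uniq
          aShrink sl k count fuel wc (left + 1) uniq valid
    else some (wc, left, uniq, valid)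

/-- A's outer `while right < len(s)` loop. -/
def aMain (sl : List Char) (k count : Int) (wc : List Int) (left right : Nat)
    (uniq valid res : Int) : Option Int :=
  if h : right < sl.length then
    match PySem.List.pyGet? sl (right : Int) with
    | none => none
    | some c =>
      match PySem.List.pyGet? wc ((c.toNat : Int) - 97) with
      | none => none
      | some c0 =>
        let uniq := if c0 == 0 then uniq + 1 else uniq
        let wc := PySem.List.pySetD wc ((c.toNat : Int) - 97) (c0 + 1)
        let valid := if c0 + 1 == k then valid + 1 else valid
        match aShrink sl k count (sl.length + 1) wc left uniq valid with
        | none => none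
        | some (wc, left, uniq, valid) =>
          let res := if valid == count then max res (((right : Int) + 1) - (left : Int)) else res
          aMain sl k count wc left (right + 1) uniq valid res
  else some res
termination_by sl.length - right

def longestKLetterSubstr (s : String) (k : Int) (count : Int) : Int :=
  (aMain s.toList k count (List.replicate 26 0) 0 0 0 0 0).getD 0

-- ===== PORT B =====
-- `none` again marks exactly the IndexError paths (a character outside the
-- 26-slot wrap range); the wrapper returns 0 there.

/-- B's inner `for right in range(left, n)` loop with its `break`. -/
def bScan (sl : List Char) (k count : Int) (left : Nat) (cnt : List Int)
    (right : Nat) (uniq valid res : Int) : Option Int :=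
  if h : right < sl.length then
    match PySem.List.pyGet? sl (right : Int) with
    | none => none
    | some c =>
      match PySem.List.pyGet? cnt ((c.toNat : Int) - 97) with
      | none => none
      | some c0 =>
        let uniq := if c0 == 0 then uniq + 1 else uniq
        let cnt := PySem.List.pySetD cnt ((c.toNat : Int) - 97) (c0 + 1)
        let valid := if c0 + 1 == k then valid + 1 else valid
        if uniq > count then some res
        else
          let res := if valid == count then max res ((right : Int) - (left : Int) + 1) else res
          bScan sl k count left cnt (right + 1) uniq valid res
  else some res
termination_by sl.length - right

/-- B's outer `for left in range(n)` loop. -/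
def bMain (sl : List Char) (k count : Int) (left : Nat) (res : Int) : Option Int :=
  if h : left < sl.length then
    match bScan sl k count left (List.replicate 26 0) left 0 0 res with
    | none => none
    | some res => bMain sl k count (left + 1) res
  else some res
termination_by sl.length - left

def longestKLetterSubstr_alt (s : String) (k : Int) (count : Int) : Int :=
  (bMain s.toList k count 0 0).getD 0

-- ===== PRECONDITION & SPEC =====
-- Pre_ excludes exactly the inputs where A raises IndexError: a character whose
-- code is outside 71..122 ('G'..'z', the codes that resolve inside the 26-slot
-- array under Python's negative-index wrap), and count < 0 on a nonempty s
-- (there A's shrink loop walks `left` past the end of s).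
def Pre_longestKLetterSubstr (s : String) (k : Int) (count : Int) : Prop :=
  (s.toList.all (fun c => 71 ≤ c.toNat && c.toNat ≤ 122)) = true ∧ (0 ≤ count ∨ s.toList = [])
instance (s : String) (k : Int) (count : Int) : Decidable (Pre_longestKLetterSubstr s k count) := by
  unfold Pre_longestKLetterSubstr; infer_instance

def pvWitness_longestKLetterSubstr : String × Int × Int := ("aabcb", 2, 2)

def Spec_longestKLetterSubstr (s : String) (k : Int) (count : Int) (out : Int) : Prop := out = longestKLetterSubstr_alt s k count
instance (s : String) (k : Int) (count : Int) (out : Int) : Decidable (Spec_longestKLetterSubstr s k count out) := by unfold Spec_longestKLetterSubstr; infer_instance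

-- ===== CLAIM (what is proved, stated in full; the proofs are below) =====
def Claim_equal_longestKLetterSubstr : Prop := ∀ (s : String) (k : Int) (count : Int), Dom_longestKLetterSubstr s k count → Pre_longestKLetterSubstr s k count → Spec_longestKLetterSubstr s k count (longestKLetterSubstr s k count)


-- ===== LEMMAS AND PROOFS =====

-- Both ports index the 26-slot array at `ord(c) - 97` with Python wrap-around;
-- for codes 71..122 that is slot `(code - 71) % 26`.
def pvSlot (c : Char) : Nat := (c.toNat - 71) % 26

/-- the slot sequence of the string -/
def pvMs (sl : List Char) : List Nat := sl.map pvSlot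

/-- the window `ms[l:r]` -/
def win (ms : List Nat) (l r : Nat) : List Nat := (ms.drop l).take (r - l)

/-- number of distinct slots in a window -/
def uqN (w : List Nat) : Nat := w.toFinset.card

/-- number of slots appearing at least k times (what windowValidCount tracks; 0 when k ≤ 0) -/
def vdN (k : Int) (w : List Nat) : Nat :=
  if 1 ≤ k then (w.toFinset.filter (fun j => k ≤ (w.count j : Int))).card else 0

/-- the length a window contributes to the answer -/
def glen (k count : Int) (w : List Nat) : Nat :=
  if (vdN k w : Int) = count ∧ (uqN w : Int) ≤ count then w.length else 0

/-- the answer: the longest contributing window -/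
def best (k count : Int) (ms : List Nat) : Nat :=
  ((Finset.range (ms.length + 1)) ×ˢ (Finset.range (ms.length + 1))).sup
    (fun p => glen k count (win ms p.1 p.2))

/-- the count array `wc` holds the per-slot counts of window `w` -/
def WC (wc : List Int) (w : List Nat) : Prop :=
  wc.length = 26 ∧ ∀ j : Nat, wc.getD j 0 = (w.count j : Int)

theorem pvSlot_lt (c : Char) : pvSlot c < 26 := Nat.mod_lt _ (by omega)

theorem bridge_get (wc : List Int) (h26 : wc.length = 26) (c : Char)
    (h1 : 71 ≤ c.toNat) (h2 : c.toNat ≤ 122) :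
    PySem.List.pyGet? wc ((c.toNat : Int) - 97) = some (wc.getD (pvSlot c) 0) := by
  rcases Nat.lt_or_ge c.toNat 97 with h | h
  · have e : ((c.toNat : Int) - 97) = -(((97 - c.toNat : Nat) : Nat) : Int) := by omega
    rw [e, PySem.List.pyGet?_neg_natCast _ _ (by omega) (by omega),
      List.getElem?_eq_getElem (by omega)]
    have : pvSlot c = wc.length - (97 - c.toNat) := by unfold pvSlot; omega
    rw [this, List.getD_eq_getElem _ _ (by omega)]
  · have e : ((c.toNat : Int) - 97) = ((c.toNat - 97 : Nat) : Int) := by omega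
    rw [e, PySem.List.pyGet?_natCast, List.getElem?_eq_getElem (by omega)]
    have : pvSlot c = c.toNat - 97 := by unfold pvSlot; omega
    rw [this, List.getD_eq_getElem _ _ (by omega)]

theorem bridge_set (wc : List Int) (h26 : wc.length = 26) (c : Char)
    (h1 : 71 ≤ c.toNat) (h2 : c.toNat ≤ 122) (v : Int) :
    PySem.List.pySetD wc ((c.toNat : Int) - 97) v = wc.set (pvSlot c) v := by
  simp only [PySem.List.pySetD, PySem.List.pySet?, PySem.List.pyIdx?, h26]
  split
  · split
    · simp only [Option.map_some, Option.getD_some]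
      congr 1
      unfold pvSlot; omega
    · omega
  · split
    · simp only [Option.map_some, Option.getD_some]
      congr 1
      unfold pvSlot; omega
    · omega

theorem getD_set (wc : List Int) (m : Nat) (v : Int) (j : Nat) (h : m < wc.length) :
    (wc.set m v).getD j 0 = if j = m then v else wc.getD j 0 := by
  simp [List.getD_eq_getElem?_getD, List.getElem?_set]
  split <;> simp_all [eq_comm]

-- window calculus
theorem win_self (ms : List Nat) (l : Nat) : win ms l l = [] := by simp [win]

theorem win_len (ms : List Nat) (l r : Nat) (hl : l ≤ r) (hr : r ≤ ms.length) :
    (win ms l r).length = r - l := by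
  simp [win]; omega

theorem win_snoc (ms : List Nat) (l r : Nat) (hl : l ≤ r) (hr : r < ms.length) :
    win ms l (r + 1) = win ms l r ++ [ms[r]] := by
  unfold win
  have h1 : r + 1 - l = (r - l) + 1 := by omega
  rw [h1, List.take_add_one]
  congr 1
  rw [List.getElem?_drop, List.getElem?_eq_getElem (by omega)]
  simp
  congr 1
  omega

theorem win_cons (ms : List Nat) (l r : Nat) (hl : l < r) (hr : r ≤ ms.length) :
    win ms l r = ms[l]'(by omega) :: win ms (l + 1) r := by
  unfold win
  rw [List.drop_eq_getElem_cons (by omega)]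
  have h1 : r - l = (r - (l + 1)) + 1 := by omega
  rw [h1, List.take_succ_cons]

theorem win_split (ms : List Nat) (l' l r : Nat) (h1 : l' ≤ l) (h2 : l ≤ r) :
    win ms l' r = win ms l' l ++ win ms l r := by
  unfold win
  have e : r - l' = (l - l') + (r - l) := by omega
  rw [e, List.take_add]
  congr 2
  rw [List.drop_drop]
  congr 1
  omega

theorem win_past (ms : List Nat) (l r : Nat) (h : ms.length ≤ l) : win ms l r = [] := by
  simp [win, List.drop_eq_nil_of_le h]

-- count calculus
theorem count_app (w : List Nat) (x j : Nat) :
    (w ++ [x]).count j = w.count j + (if j = x then 1 else 0) := by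
  rw [List.count_append]
  congr 1
  by_cases hj : j = x
  · subst hj; simp
  · simp only [List.count_cons, List.count_nil, beq_iff_eq, zero_add]
    rw [if_neg (by omega), if_neg hj]

theorem perm_inv_uq (w w' : List Nat) (h : w.Perm w') : uqN w = uqN w' := by
  unfold uqN; rw [List.toFinset_eq_of_perm _ _ h]

theorem perm_inv_vd (k : Int) (w w' : List Nat) (h : w.Perm w') : vdN k w = vdN k w' := by
  unfold vdN
  have e : (w.toFinset.filter (fun j => k ≤ (w.count j : Int)))
      = (w'.toFinset.filter (fun j => k ≤ (w'.count j : Int))) := by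
    rw [List.toFinset_eq_of_perm _ _ h]
    ext j
    simp [h.count_eq]
  rw [e]

theorem uq_snoc (w : List Nat) (x : Nat) :
    uqN (w ++ [x]) = uqN w + (if w.count x = 0 then 1 else 0) := by
  unfold uqN
  rw [List.toFinset_append]
  by_cases hx : x ∈ w
  · have h0 : ¬ (w.count x = 0) := by simp [List.count_eq_zero]; exact hx
    rw [if_neg h0, Finset.union_eq_left.mpr (by simp [hx])]
    omega
  · have h0 : w.count x = 0 := by simp [List.count_eq_zero, hx]
    rw [if_pos h0]
    have e : w.toFinset ∪ [x].toFinset = insert x w.toFinset := by simp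
    rw [e, Finset.card_insert_of_notMem (by simp [hx])]

theorem vd_snoc (k : Int) (w : List Nat) (x : Nat) :
    vdN k (w ++ [x]) = vdN k w + (if (w.count x : Int) + 1 = k then 1 else 0) := by
  unfold vdN
  by_cases hk : 1 ≤ k
  · simp only [hk, if_true]
    have hset : ((w ++ [x]).toFinset.filter (fun j => k ≤ ((w ++ [x]).count j : Int)))
        = if (w.count x : Int) + 1 = k then insert x (w.toFinset.filter (fun j => k ≤ (w.count j : Int)))
          else w.toFinset.filter (fun j => k ≤ (w.count j : Int)) := by
      split
      next hcnt =>
        ext j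
        simp only [Finset.mem_filter, Finset.mem_insert, List.mem_toFinset,
          ← List.count_pos_iff, count_app]
        by_cases hj : j = x
        · subst hj
          simp only [true_or, iff_true, if_true]
          push_cast
          constructor <;> omega
        · simp only [hj, false_or]
          push_cast
          omega
      next hcnt =>
        ext j
        simp only [Finset.mem_filter, List.mem_toFinset, ← List.count_pos_iff, count_app]
        by_cases hj : j = x
        · subst hj
          simp only [if_true]
          omega
        · simp only [if_neg hj]
          push_cast
          omega
    rw [hset]
    split
    next hcnt =>
      rw [Finset.card_insert_of_notMem]
      simp only [Finset.mem_filter, List.mem_toFinset, ← List.count_pos_iff]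
      omega
    next => simp
  · simp only [hk, if_false]
    have : ¬ ((w.count x : Int) + 1 = k) := by omega
    simp [this]

theorem uq_cons (w : List Nat) (x : Nat) :
    uqN (x :: w) = uqN w + (if w.count x = 0 then 1 else 0) := by
  rw [perm_inv_uq _ _ (List.perm_append_singleton x w).symm, uq_snoc]

theorem vd_cons (k : Int) (w : List Nat) (x : Nat) :
    vdN k (x :: w) = vdN k w + (if (w.count x : Int) + 1 = k then 1 else 0) := by
  rw [perm_inv_vd _ _ _ (List.perm_append_singleton x w).symm, vd_snoc]

theorem vd_le_uq (k : Int) (w : List Nat) : vdN k w ≤ uqN w := by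
  unfold vdN uqN
  split
  · exact Finset.card_filter_le _ _
  · omega

theorem uq_append_le (u w : List Nat) : uqN w ≤ uqN (u ++ w) := by
  unfold uqN
  exact Finset.card_le_card (by rw [List.toFinset_append]; exact Finset.subset_union_right)

/-- the domination lemma: a left-extension keeping at most `count` distinct
slots of a contributing window still contributes -/
theorem dominate (k count : Int) (u w : List Nat)
    (h1 : (vdN k w : Int) = count) (h2 : (uqN w : Int) ≤ count)
    (h3 : (uqN (u ++ w) : Int) ≤ count) : (vdN k (u ++ w) : Int) = count := by
  by_cases hk : 1 ≤ k
  · have hle := uq_append_le u w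
    have hvu := vd_le_uq k w
    have huu : uqN w = uqN (u ++ w) := by omega
    have hvweq : vdN k w = uqN w := by omega
    -- toFinsets are equal
    have hsub : w.toFinset ⊆ (u ++ w).toFinset := by
      rw [List.toFinset_append]; exact Finset.subset_union_right
    have hfeq : w.toFinset = (u ++ w).toFinset :=
      Finset.eq_of_subset_of_card_le hsub (le_of_eq huu.symm)
    -- every slot of w has count ≥ k in w
    have hall : ∀ j ∈ w.toFinset, k ≤ (w.count j : Int) := by
      intro j hj
      by_contra hcon
      have : (w.toFinset.filter (fun j => k ≤ (w.count j : Int))).card < w.toFinset.card := by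
        apply Finset.card_lt_card
        constructor
        · exact Finset.filter_subset _ _
        · intro hsub2
          have := hsub2 hj
          simp at this
          exact hcon this.2
      unfold vdN uqN at hvweq
      rw [if_pos hk] at hvweq
      omega
    have : (vdN k (u ++ w)) = uqN (u ++ w) := by
      unfold vdN uqN
      rw [if_pos hk]
      congr 1
      rw [Finset.filter_eq_self]
      intro j hj
      rw [← hfeq] at hj
      have := hall j hj
      rw [List.count_append]
      push_cast
      omega
    omega
  · unfold vdN at *
    rw [if_neg hk] at *
    omega

-- counts relating chars and slots
theorem pvMs_getElem (sl : List Char) (r : Nat) (h : r < sl.length) :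
    (pvMs sl)[r]'(by simpa [pvMs] using h) = pvSlot (sl[r]) := by
  simp [pvMs]

-- loop invariants
/-- best window starting at l and ending after r -/
def colTail (k count : Int) (ms : List Nat) (l r : Nat) : Nat :=
  (Finset.Icc (r + 1) ms.length).sup (fun e => glen k count (win ms l e))

/-- best window starting at l -/
def colBest (k count : Int) (ms : List Nat) (l : Nat) : Nat :=
  (Finset.range (ms.length + 1)).sup (fun e => glen k count (win ms l e))

/-- best window ending at e -/
def rowBest (k count : Int) (ms : List Nat) (e : Nat) : Nat :=
  (Finset.range (ms.length + 1)).sup (fun l => glen k count (win ms l e))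

theorem len_pvMs (sl : List Char) : (pvMs sl).length = sl.length := by simp [pvMs]

-- small facts and state-correspondence steps
theorem sup_range_succ_max (n : Nat) (f : Nat → Nat) :
    (Finset.range (n + 1)).sup f = max ((Finset.range n).sup f) (f n) := by
  rw [Finset.range_add_one, Finset.sup_insert]
  exact max_comm _ _

theorem sup_Icc_split (f : Nat → Nat) (a b : Nat) (h : a ≤ b) :
    (Finset.Icc a b).sup f = max (f a) ((Finset.Icc (a + 1) b).sup f) := by
  rw [Finset.Icc_add_one_left_eq_Ioc, ← Finset.Ioc_insert_left h, Finset.sup_insert]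

theorem uqN_nil : uqN [] = 0 := rfl

theorem vdN_nil (k : Int) : vdN k [] = 0 := by unfold vdN; split <;> simp

theorem glen_nil (k count : Int) : glen k count [] = 0 := by unfold glen; split <;> rfl

theorem win_degen (ms : List Nat) (l e : Nat) (h : e ≤ l) : win ms l e = [] := by
  unfold win
  rw [Nat.sub_eq_zero_of_le h, List.take_zero]

theorem uq_le_snoc (w : List Nat) (x : Nat) : uqN w ≤ uqN (w ++ [x]) := by
  rw [uq_snoc]; omega

theorem uq_prefix_le (u w : List Nat) : uqN u ≤ uqN (u ++ w) := by
  rw [perm_inv_uq _ _ List.perm_append_comm]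
  exact uq_append_le w u

theorem WC_replicate : WC (List.replicate 26 0) [] := by
  refine ⟨by simp, fun j => ?_⟩
  rw [List.getD_eq_getElem?_getD, List.getElem?_replicate]
  split <;> simp

theorem WC_get (wc : List Int) (w : List Nat) (hwc : WC wc w) (c : Char)
    (h1 : 71 ≤ c.toNat) (h2 : c.toNat ≤ 122) :
    PySem.List.pyGet? wc ((c.toNat : Int) - 97) = some ((w.count (pvSlot c) : Int)) := by
  rw [bridge_get wc hwc.1 c h1 h2, hwc.2]

theorem WC_snoc (wc : List Int) (w : List Nat) (x : Nat) (hx : x < 26) (hwc : WC wc w) :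
    WC (wc.set x ((w.count x : Int) + 1)) (w ++ [x]) := by
  refine ⟨by simp [hwc.1], fun j => ?_⟩
  rw [getD_set _ _ _ _ (by rw [hwc.1]; exact hx), count_app]
  split
  next hj => subst hj; push_cast; ring
  next hj => rw [hwc.2 j]; simp

theorem WC_uncons (wc : List Int) (w : List Nat) (x : Nat) (hx : x < 26) (hwc : WC wc (x :: w)) :
    WC (wc.set x (((x :: w).count x : Int) - 1)) w := by
  refine ⟨by simp [hwc.1], fun j => ?_⟩
  rw [getD_set _ _ _ _ (by rw [hwc.1]; exact hx)]
  split
  next hj =>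
    subst hj
    rw [List.count_cons_self]
    push_cast; ring
  next hj =>
    rw [hwc.2 j, List.count_cons_of_ne (by omega)]

theorem win_uq_mono_r (ms : List Nat) (l r : Nat) (hl : l ≤ r) (hr : r < ms.length) :
    uqN (win ms l r) ≤ uqN (win ms l (r + 1)) := by
  rw [win_snoc ms l r hl hr]
  exact uq_le_snoc _ _

theorem bScan_term (sl : List Char) (k count : Int) (l r : Nat) (cnt : List Int)
    (uniq valid res : Int) (hr : ¬ r < sl.length) (hres : 0 ≤ res) :
    bScan sl k count l cnt r uniq valid res =
      some (max res ((colTail k count (pvMs sl) l r : Nat) : Int)) := by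
  rw [bScan, dif_neg hr]
  unfold colTail
  rw [len_pvMs, Finset.Icc_eq_empty (by omega)]
  simp [max_eq_left hres]

theorem colTail_split (k count : Int) (ms : List Nat) (l r : Nat) (h : r < ms.length) :
    colTail k count ms l r =
      max (glen k count (win ms l (r + 1))) (colTail k count ms l (r + 1)) := by
  unfold colTail
  rw [sup_Icc_split _ _ _ (by omega)]

theorem bScan_eq (sl : List Char) (k count : Int)
    (hch : ∀ c ∈ sl, 71 ≤ c.toNat ∧ c.toNat ≤ 122) (hc : 0 ≤ count) :
    ∀ (d l r : Nat) (cnt : List Int) (uniq valid res : Int),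
      sl.length - r ≤ d → l ≤ r → r ≤ sl.length →
      WC cnt (win (pvMs sl) l r) →
      uniq = (uqN (win (pvMs sl) l r) : Int) →
      valid = (vdN k (win (pvMs sl) l r) : Int) →
      uniq ≤ count → 0 ≤ res →
      bScan sl k count l cnt r uniq valid res =
        some (max res ((colTail k count (pvMs sl) l r : Nat) : Int)) := by
  intro d
  induction d with
  | zero =>
    intro l r cnt uniq valid res hd hlr hrn hwc hu hv hub hres
    exact bScan_term sl k count l r cnt uniq valid res (by omega) hres
  | succ d ih =>
    intro l r cnt uniq valid res hd hlr hrn hwc hu hv hub hres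
    by_cases hr : r < sl.length
    · rw [bScan, dif_pos hr]
      have hchr := hch (sl[r]'hr) (List.getElem_mem hr)
      have hx26 : pvSlot (sl[r]'hr) < 26 := pvSlot_lt _
      simp only [PySem.List.pyGet?_natCast, List.getElem?_eq_getElem hr,
        WC_get cnt _ hwc (sl[r]'hr) hchr.1 hchr.2,
        bridge_set cnt hwc.1 (sl[r]'hr) hchr.1 hchr.2]
      have hsn : win (pvMs sl) l (r + 1) = win (pvMs sl) l r ++ [pvSlot (sl[r]'hr)] := by
        have := win_snoc (pvMs sl) l r hlr (by rw [len_pvMs]; exact hr)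
        rw [pvMs_getElem sl r hr] at this
        exact this
      have huq1 : (if ((((win (pvMs sl) l r).count (pvSlot (sl[r]'hr)) : Nat) : Int)) == 0
          then uniq + 1 else uniq) = ((uqN (win (pvMs sl) l (r + 1)) : Nat) : Int) := by
        rw [hsn, uq_snoc, hu]
        by_cases h0 : (win (pvMs sl) l r).count (pvSlot (sl[r]'hr)) = 0 <;>
          simp [h0] <;> push_cast <;> omega
      have hvd1 : (if ((((win (pvMs sl) l r).count (pvSlot (sl[r]'hr)) : Nat) : Int) + 1) == k
          then valid + 1 else valid) = ((vdN k (win (pvMs sl) l (r + 1)) : Nat) : Int) := by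
        rw [hsn, vd_snoc, hv]
        by_cases h0 : ((win (pvMs sl) l r).count (pvSlot (sl[r]'hr)) : Int) + 1 = k <;>
          simp [h0] <;> push_cast <;> omega
      have hwc1 : WC ((cnt.set (pvSlot (sl[r]'hr))
          ((((win (pvMs sl) l r).count (pvSlot (sl[r]'hr)) : Nat) : Int) + 1)))
          (win (pvMs sl) l (r + 1)) := by
        rw [hsn]
        exact WC_snoc cnt _ _ hx26 hwc
      simp only [huq1, hvd1]
      by_cases hbr : count < ((uqN (win (pvMs sl) l (r + 1)) : Nat) : Int)
      · rw [if_pos hbr]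
        have hz : colTail k count (pvMs sl) l r = 0 := by
          unfold colTail
          refine Nat.le_zero.mp (Finset.sup_le fun e he => ?_)
          simp only [Finset.mem_Icc] at he
          have hsplit : win (pvMs sl) l e = win (pvMs sl) l (r + 1) ++ win (pvMs sl) (r + 1) e :=
            win_split _ _ _ _ (by omega) (by omega)
          have hmon : uqN (win (pvMs sl) l (r + 1)) ≤ uqN (win (pvMs sl) l e) := by
            rw [hsplit]; exact uq_prefix_le _ _
          unfold glen
          rw [if_neg (by rintro ⟨h1, h2⟩; omega)]
        rw [hz]
        simp [max_eq_left hres]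
      · rw [if_neg hbr]
        rw [not_lt] at hbr
        have hres' : (if ((vdN k (win (pvMs sl) l (r + 1)) : Nat) : Int) == count
            then max res ((r : Int) - (l : Int) + 1) else res) =
            max res ((glen k count (win (pvMs sl) l (r + 1)) : Nat) : Int) := by
          by_cases hvdc : ((vdN k (win (pvMs sl) l (r + 1)) : Nat) : Int) = count
          · rw [if_pos (by simp [hvdc])]
            unfold glen
            rw [if_pos ⟨hvdc, hbr⟩, win_len _ _ _ (by omega) (by rw [len_pvMs]; omega)]
            congr 1
            push_cast
            omega
          · rw [if_neg (by simp [hvdc])]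
            unfold glen
            rw [if_neg (by tauto)]
            simp [max_eq_left hres]
        rw [hres']
        rw [ih l (r + 1) _ _ _ _ (by omega) (by omega) (by omega) hwc1 rfl rfl hbr
          (le_max_of_le_left hres)]
        congr 1
        rw [colTail_split k count (pvMs sl) l r (by rw [len_pvMs]; exact hr)]
        rw [Nat.cast_max, max_assoc]
    · exact bScan_term sl k count l r cnt uniq valid res hr hres

theorem colTail_self_eq_colBest (k count : Int) (ms : List Nat) (l : Nat) :
    colTail k count ms l l = colBest k count ms l := by
  unfold colTail colBest
  apply le_antisymm
  · refine Finset.sup_le fun e he => ?_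
    simp only [Finset.mem_Icc] at he
    exact Finset.le_sup (f := fun e => glen k count (win ms l e)) (show e ∈ Finset.range (ms.length + 1) from Finset.mem_range.mpr (by omega))
  · refine Finset.sup_le fun e he => ?_
    simp only [Finset.mem_range] at he
    by_cases hle : e ≤ l
    · rw [win_degen ms l e hle, glen_nil]
      exact Nat.zero_le _
    · exact Finset.le_sup (f := fun e => glen k count (win ms l e)) (show e ∈ Finset.Icc (l + 1) ms.length from Finset.mem_Icc.mpr ⟨by omega, by omega⟩)

theorem colBest_past (k count : Int) (ms : List Nat) (l : Nat) (h : ms.length ≤ l) :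
    colBest k count ms l = 0 := by
  unfold colBest
  refine Nat.le_zero.mp (Finset.sup_le fun e he => ?_)
  rw [win_past ms l e h, glen_nil]

theorem bMain_eq (sl : List Char) (k count : Int)
    (hch : ∀ c ∈ sl, 71 ≤ c.toNat ∧ c.toNat ≤ 122) (hc : 0 ≤ count) :
    ∀ (d l : Nat) (res : Int), sl.length - l ≤ d → l ≤ sl.length → 0 ≤ res →
      bMain sl k count l res =
        some (max res (((Finset.Icc l sl.length).sup
          (fun l' => colBest k count (pvMs sl) l') : Nat) : Int)) := by
  intro d
  induction d with
  | zero =>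
    intro l res hd hln hres
    have hleq : l = sl.length := by omega
    subst hleq
    rw [bMain, dif_neg (by omega)]
    rw [Finset.Icc_self, Finset.sup_singleton,
      colBest_past k count (pvMs sl) sl.length (by rw [len_pvMs])]
    simp [max_eq_left hres]
  | succ d ih =>
    intro l res hd hln hres
    by_cases hl : l < sl.length
    · rw [bMain, dif_pos hl]
      have hbs := bScan_eq sl k count hch hc (sl.length - l) l l (List.replicate 26 0) 0 0 res
        (by omega) le_rfl (by omega)
        (by rw [win_self]; exact WC_replicate)
        (by rw [win_self, uqN_nil]; rfl)
        (by rw [win_self, vdN_nil]; rfl)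
        hc hres
      simp only [hbs]
      rw [ih (l + 1) _ (by omega) (by omega) (le_max_of_le_left hres)]
      congr 1
      rw [colTail_self_eq_colBest,
        sup_Icc_split (fun l' => colBest k count (pvMs sl) l') l sl.length (by omega),
        Nat.cast_max, ← max_assoc]
    · have hleq : l = sl.length := by omega
      subst hleq
      rw [bMain, dif_neg (by omega)]
      rw [Finset.Icc_self, Finset.sup_singleton,
        colBest_past k count (pvMs sl) sl.length (by rw [len_pvMs])]
      simp [max_eq_left hres]

theorem aShrink_eq (sl : List Char) (k count : Int)
    (hch : ∀ c ∈ sl, 71 ≤ c.toNat ∧ c.toNat ≤ 122) (hc : 0 ≤ count) :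
    ∀ (fuel l R : Nat) (wc : List Int) (uniq valid : Int),
      R - l < fuel → l ≤ R → R ≤ sl.length →
      WC wc (win (pvMs sl) l R) →
      uniq = (uqN (win (pvMs sl) l R) : Int) →
      valid = (vdN k (win (pvMs sl) l R) : Int) →
      ∃ (lf : Nat) (wcf : List Int), l ≤ lf ∧ lf ≤ R ∧
        aShrink sl k count fuel wc l uniq valid =
          some (wcf, lf, (uqN (win (pvMs sl) lf R) : Int), (vdN k (win (pvMs sl) lf R) : Int)) ∧
        WC wcf (win (pvMs sl) lf R) ∧
        ((uqN (win (pvMs sl) lf R) : Int)) ≤ count ∧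
        (∀ l' : Nat, l ≤ l' → l' < lf → count < (uqN (win (pvMs sl) l' R) : Int)) := by
  intro fuel
  induction fuel with
  | zero => intro l R wc uniq valid hf; omega
  | succ fuel ih =>
    intro l R wc uniq valid hf hlR hRn hwc hu hv
    by_cases hgt : uniq > count
    · have hne : win (pvMs sl) l R ≠ [] := by
        intro h0
        rw [h0, uqN_nil] at hu
        omega
      have hlt : l < R := by
        by_contra hno
        exact hne (win_degen _ _ _ (by omega))
      have hlen : l < sl.length := by omega
      have hchr := hch (sl[l]'hlen) (List.getElem_mem hlen)
      have hx26 : pvSlot (sl[l]'hlen) < 26 := pvSlot_lt _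
      have hcons : win (pvMs sl) l R = pvSlot (sl[l]'hlen) :: win (pvMs sl) (l + 1) R := by
        have := win_cons (pvMs sl) l R (by omega) (by rw [len_pvMs]; omega)
        rw [pvMs_getElem sl l hlen] at this
        exact this
      have hstep : aShrink sl k count (fuel + 1) wc l uniq valid =
          aShrink sl k count fuel
            (wc.set (pvSlot (sl[l]'hlen)) ((((win (pvMs sl) l R).count (pvSlot (sl[l]'hlen)) : Nat) : Int) - 1))
            (l + 1)
            (if ((((win (pvMs sl) l R).count (pvSlot (sl[l]'hlen)) : Nat) : Int) - 1) == 0 then uniq - 1 else uniq)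
            (if ((((win (pvMs sl) l R).count (pvSlot (sl[l]'hlen)) : Nat) : Int)) == k then valid - 1 else valid) := by
        simp only [aShrink]
        rw [if_pos hgt]
        simp only [PySem.List.pyGet?_natCast, List.getElem?_eq_getElem hlen,
          WC_get wc _ hwc (sl[l]'hlen) hchr.1 hchr.2,
          bridge_set wc hwc.1 (sl[l]'hlen) hchr.1 hchr.2]
      have hcnt : (win (pvMs sl) l R).count (pvSlot (sl[l]'hlen))
          = (win (pvMs sl) (l + 1) R).count (pvSlot (sl[l]'hlen)) + 1 := by
        rw [hcons, List.count_cons_self]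
      have hu' : (if ((((win (pvMs sl) l R).count (pvSlot (sl[l]'hlen)) : Nat) : Int) - 1) == 0 then uniq - 1 else uniq)
          = ((uqN (win (pvMs sl) (l + 1) R) : Nat) : Int) := by
        rw [hu, hcons, uq_cons, List.count_cons_self]
        simp only [beq_iff_eq]
        split_ifs <;> omega
      have hv' : (if ((((win (pvMs sl) l R).count (pvSlot (sl[l]'hlen)) : Nat) : Int)) == k then valid - 1 else valid)
          = ((vdN k (win (pvMs sl) (l + 1) R) : Nat) : Int) := by
        rw [hv, hcons, vd_cons, List.count_cons_self]
        simp only [beq_iff_eq]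
        split_ifs <;> omega
      have hwc' : WC (wc.set (pvSlot (sl[l]'hlen)) ((((win (pvMs sl) l R).count (pvSlot (sl[l]'hlen)) : Nat) : Int) - 1))
          (win (pvMs sl) (l + 1) R) := by
        have h2 := WC_uncons wc (win (pvMs sl) (l + 1) R) (pvSlot (sl[l]'hlen)) hx26
          (by rw [← hcons]; exact hwc)
        rw [← hcons] at h2
        exact h2
      rw [hstep, hu', hv']
      obtain ⟨lf, wcf, ha, hb, hsome, hwcf, hle, hblock⟩ :=
        ih (l + 1) R _ _ _ (by omega) (by omega) hRn hwc' rfl rfl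
      refine ⟨lf, wcf, by omega, hb, hsome, hwcf, hle, ?_⟩
      intro l' h1 h2
      rcases Nat.eq_or_lt_of_le h1 with he | hlt2
      · rw [← he]
        omega
      · exact hblock l' (by omega) h2
    · refine ⟨l, wc, le_rfl, hlR, ?_, hwc, by omega, fun l' h1 h2 => by omega⟩
      simp only [aShrink]
      rw [if_neg hgt, hu, hv]

theorem glen_le_len (k count : Int) (w : List Nat) : glen k count w ≤ w.length := by
  unfold glen
  split
  · exact le_rfl
  · exact Nat.zero_le _

theorem aMain_eq (sl : List Char) (k count : Int)
    (hch : ∀ c ∈ sl, 71 ≤ c.toNat ∧ c.toNat ≤ 122) (hc : 0 ≤ count) :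
    ∀ (d l r : Nat) (wc : List Int) (uniq valid res : Int),
      sl.length - r ≤ d → l ≤ r → r ≤ sl.length →
      WC wc (win (pvMs sl) l r) →
      uniq = (uqN (win (pvMs sl) l r) : Int) →
      valid = (vdN k (win (pvMs sl) l r) : Int) →
      uniq ≤ count →
      (∀ l' : Nat, l' < l → count < (uqN (win (pvMs sl) l' r) : Int)) →
      res = (((Finset.range (r + 1)).sup (fun e => rowBest k count (pvMs sl) e) : Nat) : Int) →
      aMain sl k count wc l r uniq valid res =
        some ((((Finset.range (sl.length + 1)).sup (fun e => rowBest k count (pvMs sl) e) : Nat) : Int)) := by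
  intro d
  induction d with
  | zero =>
    intro l r wc uniq valid res hd hlr hrn hwc hu hv hub hblk hres
    have heq : r = sl.length := by omega
    subst heq
    rw [aMain, dif_neg (by omega), hres]
  | succ d ih =>
    intro l r wc uniq valid res hd hlr hrn hwc hu hv hub hblk hres
    by_cases hr : r < sl.length
    · rw [aMain, dif_pos hr]
      have hchr := hch (sl[r]'hr) (List.getElem_mem hr)
      have hx26 : pvSlot (sl[r]'hr) < 26 := pvSlot_lt _
      simp only [PySem.List.pyGet?_natCast, List.getElem?_eq_getElem hr,
        WC_get wc _ hwc (sl[r]'hr) hchr.1 hchr.2,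
        bridge_set wc hwc.1 (sl[r]'hr) hchr.1 hchr.2]
      have hsn : win (pvMs sl) l (r + 1) = win (pvMs sl) l r ++ [pvSlot (sl[r]'hr)] := by
        have := win_snoc (pvMs sl) l r hlr (by rw [len_pvMs]; exact hr)
        rw [pvMs_getElem sl r hr] at this
        exact this
      have huq1 : (if ((((win (pvMs sl) l r).count (pvSlot (sl[r]'hr)) : Nat) : Int)) == 0
          then uniq + 1 else uniq) = ((uqN (win (pvMs sl) l (r + 1)) : Nat) : Int) := by
        rw [hsn, uq_snoc, hu]
        simp only [beq_iff_eq]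
        split_ifs <;> push_cast <;> omega
      have hvd1 : (if ((((win (pvMs sl) l r).count (pvSlot (sl[r]'hr)) : Nat) : Int) + 1) == k
          then valid + 1 else valid) = ((vdN k (win (pvMs sl) l (r + 1)) : Nat) : Int) := by
        rw [hsn, vd_snoc, hv]
        simp only [beq_iff_eq]
        split_ifs <;> push_cast <;> omega
      have hwc1 : WC ((wc.set (pvSlot (sl[r]'hr))
          ((((win (pvMs sl) l r).count (pvSlot (sl[r]'hr)) : Nat) : Int) + 1)))
          (win (pvMs sl) l (r + 1)) := by
        rw [hsn]
        exact WC_snoc wc _ _ hx26 hwc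
      simp only [huq1, hvd1]
      obtain ⟨lf, wcf, ha, hb, hsome, hwcf, hle, hblock⟩ :=
        aShrink_eq sl k count hch hc (sl.length + 1) l (r + 1) _ _ _ (by omega) (by omega)
          (by omega) hwc1 rfl rfl
      simp only [hsome]
      have hblk1 : ∀ l' : Nat, l' < lf → count < ((uqN (win (pvMs sl) l' (r + 1)) : Nat) : Int) := by
        intro l' h2
        by_cases hcase : l' < l
        · have hmon := win_uq_mono_r (pvMs sl) l' r (by omega) (by rw [len_pvMs]; exact hr)
          have := hblk l' hcase
          omega
        · exact hblock l' (by omega) h2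
      have hrow : rowBest k count (pvMs sl) (r + 1) = glen k count (win (pvMs sl) lf (r + 1)) := by
        unfold rowBest
        apply le_antisymm
        · refine Finset.sup_le fun l' _ => ?_
          by_cases hz : glen k count (win (pvMs sl) l' (r + 1)) = 0
          · rw [hz]; exact Nat.zero_le _
          · have hrcd : (vdN k (win (pvMs sl) l' (r + 1)) : Int) = count ∧
                (uqN (win (pvMs sl) l' (r + 1)) : Int) ≤ count := by
              by_contra hno
              exact hz (by unfold glen; rw [if_neg hno])
            have hlf_le : lf ≤ l' := by
              by_contra hno
              have := hblk1 l' (by omega)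
              omega
            have hl'le : l' ≤ r + 1 := by
              by_contra hno
              exact hz (by rw [win_degen _ _ _ (by omega), glen_nil])
            have hsplit := win_split (pvMs sl) lf l' (r + 1) hlf_le hl'le
            have hdom := dominate k count (win (pvMs sl) lf l') (win (pvMs sl) l' (r + 1))
              hrcd.1 hrcd.2 (by rw [← hsplit]; exact hle)
            have hglf : glen k count (win (pvMs sl) lf (r + 1)) = r + 1 - lf := by
              unfold glen
              rw [if_pos ⟨by rw [hsplit]; exact hdom, hle⟩,
                win_len _ _ _ (by omega) (by rw [len_pvMs]; omega)]
            have hlen' : (win (pvMs sl) l' (r + 1)).length = r + 1 - l' := by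
              rw [win_len _ _ _ (by omega) (by rw [len_pvMs]; omega)]
            have := glen_le_len k count (win (pvMs sl) l' (r + 1))
            omega
        · exact Finset.le_sup (f := fun l' => glen k count (win (pvMs sl) l' (r + 1)))
            (show lf ∈ Finset.range ((pvMs sl).length + 1) from
              Finset.mem_range.mpr (by rw [len_pvMs]; omega))
      have hres1 : (if ((vdN k (win (pvMs sl) lf (r + 1)) : Nat) : Int) == count
          then max res (((r : Int) + 1) - (lf : Int)) else res)
          = (((Finset.range (r + 1 + 1)).sup (fun e => rowBest k count (pvMs sl) e) : Nat) : Int) := by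
        rw [sup_range_succ_max, Nat.cast_max, hrow]
        by_cases hvdc : ((vdN k (win (pvMs sl) lf (r + 1)) : Nat) : Int) = count
        · rw [if_pos (by simp [hvdc])]
          have hglf : glen k count (win (pvMs sl) lf (r + 1)) = r + 1 - lf := by
            unfold glen
            rw [if_pos ⟨hvdc, hle⟩, win_len _ _ _ (by omega) (by rw [len_pvMs]; omega)]
          rw [hglf, hres]
          congr 1
          push_cast
          omega
        · rw [if_neg (by simp [hvdc])]
          have hglf : glen k count (win (pvMs sl) lf (r + 1)) = 0 := by
            unfold glen
            rw [if_neg (by tauto)]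
          rw [hglf, hres]
          simp
      rw [hres1]
      exact ih lf (r + 1) wcf _ _ _ (by omega) hb (by omega) hwcf rfl rfl hle hblk1 rfl
    · have heq : r = sl.length := by omega
      subst heq
      rw [aMain, dif_neg (by omega), hres]

theorem rowBest_zero (k count : Int) (ms : List Nat) : rowBest k count ms 0 = 0 := by
  unfold rowBest
  refine Nat.le_zero.mp (Finset.sup_le fun l' _ => ?_)
  rw [win_degen _ _ _ (Nat.zero_le _), glen_nil]

theorem sup_row_eq_sup_col (k count : Int) (ms : List Nat) :
    (Finset.range (ms.length + 1)).sup (rowBest k count ms) =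
      (Finset.range (ms.length + 1)).sup (colBest k count ms) := by
  unfold rowBest colBest
  exact Finset.sup_comm _ _ _

-- ===== VERDICT (by name: the statement is the Claim_ definition above) =====
theorem longestKLetterSubstr_spec : Claim_equal_longestKLetterSubstr := by
  intro s k count hdom hpre
  obtain ⟨hchb, hcase⟩ := hpre
  have hch : ∀ c ∈ s.toList, 71 ≤ c.toNat ∧ c.toNat ≤ 122 := by
    simp only [List.all_eq_true, Bool.and_eq_true, decide_eq_true_eq] at hchb
    exact hchb
  unfold Spec_longestKLetterSubstr longestKLetterSubstr longestKLetterSubstr_alt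
  rcases hcase with hc | hnil
  · have hA := aMain_eq s.toList k count hch hc s.toList.length 0 0 (List.replicate 26 0) 0 0 0
      (by omega) le_rfl (by omega)
      (by rw [win_self]; exact WC_replicate)
      (by rw [win_self, uqN_nil]; rfl)
      (by rw [win_self, vdN_nil]; rfl)
      hc
      (fun l' h => absurd h (by omega))
      (by rw [Finset.range_one, Finset.sup_singleton, rowBest_zero]; rfl)
    have hB := bMain_eq s.toList k count hch hc s.toList.length 0 0 (by omega) (by omega) le_rfl
    rw [hA, hB]
    simp only [Option.getD_some]
    have hIcc : Finset.Icc 0 s.toList.length = Finset.range (s.toList.length + 1) := by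
      ext x
      simp only [Finset.mem_Icc, Finset.mem_range]
      omega
    rw [hIcc, max_eq_right (by positivity)]
    rw [show s.toList.length = (pvMs s.toList).length from (len_pvMs s.toList).symm]
    rw [sup_row_eq_sup_col]
  · rw [hnil]
    rw [aMain, dif_neg (by simp), bMain, dif_neg (by simp)]
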